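-- pv_equiv track=rewrite | github.com/ietf-svn-conversion/datatracker | ietf/doc/utils.py | join_justified
-- ===== SOURCE A (Python) =====
-- def join_justified(left, right, width=72):
--     count = max(len(left), len(right))
--     left = left + ['']*(count-len(left))
--     right = right + ['']*(count-len(right))
--     lines = []
--     i = 0
--     while True:
--         l = left[i]
--         r = right[i]
--         if len(l)+1+len(r) > width:
--             left = left + ['']
--             right = right[:i] + [''] + right[i:]
--             r = right[i]
--             count += 1
--         lines.append( l + ' ' + r.rjust(width-len(l)-1) )
--         i += 1
--         if i >= count:
--             break
--     return lines
-- ===== SOURCE B (Python) =====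
-- def join_justified(left, right, width=72):
--     n = max(len(left), len(right))
--     ls = left + [''] * (n - len(left))
--     rest = right + [''] * (n - len(right))
--     lines = []
--     for l in ls:
--         r = rest[0] if rest else ''
--         if len(l) + 1 + len(r) > width:
--             lines.append(l + ' ' + ''.rjust(width - len(l) - 1))
--         else:
--             lines.append(l + ' ' + r.rjust(width - len(l) - 1))
--             rest = rest[1:]
--     for r in rest:
--         lines.append(' ' + r.rjust(width - 1))
--     return lines
-- ===== Notes on version B (the rewrite author's own statement) =====
-- stated objective: simpler
-- what changed: A repeatedly reslices and regrows both lists inside a while loop with a moving index and a mutable count; B pads once, then makes a single pass over the left column with a pending-right queue (an unfit right entry is deferred by simply not consuming it) and finally emits the leftover right entries, with no list insertion or counter bookkeeping.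
import Mathlib
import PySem

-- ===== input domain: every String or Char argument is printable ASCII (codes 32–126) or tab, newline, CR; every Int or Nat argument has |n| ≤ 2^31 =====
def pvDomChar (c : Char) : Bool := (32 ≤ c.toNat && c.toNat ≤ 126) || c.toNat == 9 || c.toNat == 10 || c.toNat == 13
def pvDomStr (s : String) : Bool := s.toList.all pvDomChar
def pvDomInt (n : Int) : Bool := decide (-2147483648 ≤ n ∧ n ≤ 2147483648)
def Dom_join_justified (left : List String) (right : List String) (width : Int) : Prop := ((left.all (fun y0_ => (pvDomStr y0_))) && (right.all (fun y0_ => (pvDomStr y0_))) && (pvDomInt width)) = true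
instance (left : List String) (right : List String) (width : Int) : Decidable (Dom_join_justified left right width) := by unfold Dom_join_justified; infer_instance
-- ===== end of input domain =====

-- B replaces A's in-place index/slice-insertion loop (which grows both lists while scanning)
-- by a single pass over the padded left column with a pending-right queue, then a map over the
-- leftover right entries; objective: simpler (no measured speed claim).

-- str.rjust(w) with the default ' ' fill (shared stdlib helper, used by both ports)
def pyRjust (s : String) (w : Int) : String :=
  String.ofList (List.replicate (w - PySem.Str.len s).toNat ' ' ++ s.toList)

-- ===== PORT A =====
-- A's while-True loop; fuel only makes the recursion total (A diverges outside Pre_,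
-- where the fuel can run out; under Pre_ the fuel is never exhausted).
def joinLoopA (width : Int) (fuel : Nat) (left right lines : List String) (i count : Int) : List String :=
  match fuel with
  | 0 => lines
  | fuel + 1 =>
    match PySem.List.pyGet? left i, PySem.List.pyGet? right i with
    | some l, some r =>
      if PySem.Str.len l + 1 + PySem.Str.len r > width then
        let left' := left ++ [""]
        let right' := PySem.List.slice right none (some i) ++ [""] ++ PySem.List.slice right (some i) none
        match PySem.List.pyGet? right' i with
        | some r' =>
          let lines' := lines ++ [l ++ " " ++ pyRjust r' (width - PySem.Str.len l - 1)]
          if i + 1 ≥ count + 1 then lines' else joinLoopA width fuel left' right' lines' (i + 1) (count + 1)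
        | none => lines
      else
        let lines' := lines ++ [l ++ " " ++ pyRjust r (width - PySem.Str.len l - 1)]
        if i + 1 ≥ count then lines' else joinLoopA width fuel left right lines' (i + 1) count
    | _, _ => lines  -- IndexError (only at left = right = [])

def join_justified (left : List String) (right : List String) (width : Int) : List String :=
  let count : Int := max (left.length : Int) (right.length : Int)
  let left1 := left ++ List.replicate (count - (left.length : Int)).toNat ""
  let right1 := right ++ List.replicate (count - (right.length : Int)).toNat ""
  joinLoopA width (3 * (left.length + right.length) + 3) left1 right1 [] 0 count

-- ===== PORT B =====
def altStep (width : Int) (st : List String × List String) (l : String) : List String × List String :=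
  let r := match st.2 with | [] => "" | r0 :: _ => r0
  if PySem.Str.len l + 1 + PySem.Str.len r > width then
    (st.1 ++ [l ++ " " ++ pyRjust "" (width - PySem.Str.len l - 1)], st.2)
  else
    (st.1 ++ [l ++ " " ++ pyRjust r (width - PySem.Str.len l - 1)], st.2.drop 1)

def join_justified_alt (left : List String) (right : List String) (width : Int) : List String :=
  let n : Int := max (left.length : Int) (right.length : Int)
  let ls := left ++ List.replicate (n - (left.length : Int)).toNat ""
  let rest := right ++ List.replicate (n - (right.length : Int)).toNat ""
  let p := ls.foldl (altStep width) ([], rest)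
  p.1 ++ p.2.map (fun r => " " ++ pyRjust r (width - 1))

-- ===== PRECONDITION & SPEC =====
-- Pre_ excludes exactly (a) left = right = [], where A raises IndexError, and (b) the inputs
-- where A never terminates: width < 1, or some right entry of length ≥ width (A defers such an
-- entry forever once the left column is exhausted).
def Pre_join_justified (left : List String) (right : List String) (width : Int) : Prop :=
  (left ≠ [] ∨ right ≠ []) ∧ 1 ≤ width ∧ ∀ r ∈ right, PySem.Str.len r + 1 ≤ width
instance (left : List String) (right : List String) (width : Int) : Decidable (Pre_join_justified left right width) := by unfold Pre_join_justified; infer_instance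

def pvWitness_join_justified : List String × List String × Int := (["ab", "c"], ["d"], 10)

def Spec_join_justified (left : List String) (right : List String) (width : Int) (out : List String) : Prop := out = join_justified_alt left right width
instance (left : List String) (right : List String) (width : Int) (out : List String) : Decidable (Spec_join_justified left right width out) := by unfold Spec_join_justified; infer_instance

-- ===== CLAIM (what is proved, stated in full; the proofs are below) =====
def Claim_equal_join_justified : Prop := ∀ (left : List String) (right : List String) (width : Int), Dom_join_justified left right width → Pre_join_justified left right width → Spec_join_justified left right width (join_justified left right width)

-- ===== LEMMAS AND PROOFS =====

-- proof-only functional view of B: one pass over the (padded) left, then the leftover rights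
def bfun (width : Int) : List String → List String → List String
  | [], rr => rr.map (fun r => " " ++ pyRjust r (width - 1))
  | l :: ls, rr =>
    if PySem.Str.len l + 1 + PySem.Str.len (rr.headD "") > width then
      (l ++ " " ++ pyRjust "" (width - PySem.Str.len l - 1)) :: bfun width ls rr
    else
      (l ++ " " ++ pyRjust (rr.headD "") (width - PySem.Str.len l - 1)) :: bfun width ls (rr.drop 1)

lemma foldl_altStep (width : Int) (ls : List String) : ∀ (acc rest : List String),
    (ls.foldl (altStep width) (acc, rest)).1
      ++ ((ls.foldl (altStep width) (acc, rest)).2.map (fun r => " " ++ pyRjust r (width - 1)))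
      = acc ++ bfun width ls rest := by
  induction ls with
  | nil => intro acc rest; simp [bfun]
  | cons l ls ih =>
    intro acc rest
    have hr : (match rest with | [] => "" | r0 :: _ => r0) = rest.headD "" := by
      cases rest <;> rfl
    simp only [List.foldl_cons, altStep, hr, bfun]
    by_cases h : PySem.Str.len l + 1 + PySem.Str.len (rest.headD "") > width
    · simp only [if_pos h, ih, List.append_assoc, List.singleton_append]
    · simp only [if_neg h, ih, List.append_assoc, List.singleton_append]

lemma joinLoopA_eq (width : Int) : ∀ (fuel : Nat) (ls : List String) (m : Nat) (rr : List String)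
    (left right lines : List String) (i : Nat),
    2 * rr.length + ls.countP (fun s => decide (s ≠ "")) ≤ fuel →
    left.drop i = ls ++ List.replicate m "" →
    right.drop i = rr →
    left.length = i + ls.length + m →
    right.length = i + rr.length →
    ls.length + m = rr.length →
    rr ≠ [] →
    (∀ r ∈ rr, PySem.Str.len r + 1 ≤ width) →
    joinLoopA width fuel left right lines (i : Int) ((i : Int) + (rr.length : Int))
      = lines ++ bfun width ls rr := by
  intro fuel
  induction fuel with
  | zero =>
    intro ls m rr left right lines i hfuel _ _ _ _ _ hne _
    exact absurd (List.length_eq_zero_iff.mp (by omega)) hne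
  | succ fuel ih =>
    intro ls m rr left right lines i hfuel hdl hdr hll hrl heq hne hfit
    obtain ⟨r, rt, rfl⟩ := List.exists_cons_of_ne_nil hne
    have h0 : PySem.Str.len "" = 0 := by decide
    have hheadR : PySem.List.pyGet? right (i : Int) = some r := by
      rw [PySem.List.pyGet?_natCast, ← List.head?_drop, hdr]; rfl
    cases ls with
    | nil =>
      have hm : m = rt.length + 1 := by simpa using heq
      subst hm
      have hheadL : PySem.List.pyGet? left (i : Int) = some "" := by
        rw [PySem.List.pyGet?_natCast, ← List.head?_drop, hdl]; rfl
      have hnov : ¬ (PySem.Str.len "" + 1 + PySem.Str.len r > width) := by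
        have := hfit r (by simp); omega
      simp only [joinLoopA, hheadL, hheadR, if_neg hnov]
      cases rt with
      | nil =>
        rw [if_pos (by push_cast [List.length_cons, List.length_nil]; omega)]
        simp [bfun]
      | cons r2 rt2 =>
        rw [if_neg (by push_cast [List.length_cons, List.length_nil]; omega)]
        have hrec := ih [] (rt2.length + 1) (r2 :: rt2) left right
          (lines ++ [("" : String) ++ " " ++ pyRjust r (width - PySem.Str.len "" - 1)]) (i + 1)
          (by simp at hfuel ⊢; omega)
          (by rw [← List.drop_drop, hdl]; simp)
          (by rw [← List.drop_drop, hdr]; simp)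
          (by simp at hll ⊢; omega)
          (by simp at hrl ⊢; omega)
          (by simp)
          (by simp)
          (fun x hx => hfit x (by simp at hx ⊢; tauto))
        have hcast : ((i : Int) + 1) = ((i + 1 : Nat) : Int) := by push_cast; ring
        have hcnt : (i : Int) + ((r :: r2 :: rt2).length : Int)
            = ((i + 1 : Nat) : Int) + (((r2 :: rt2) : List String).length : Int) := by
          push_cast; simp; ring
        rw [hcast, hcnt, hrec]
        simp [bfun, List.append_assoc]
    | cons l lt =>
      have hheadL : PySem.List.pyGet? left (i : Int) = some l := by
        rw [PySem.List.pyGet?_natCast, ← List.head?_drop, hdl]; rfl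
      by_cases hov : PySem.Str.len l + 1 + PySem.Str.len r > width
      · -- overflow: the right entry is deferred, a '' is emitted instead
        have hlne : l ≠ "" := by
          intro hl; subst hl
          have := hfit r (by simp); omega
        have htk : (List.take i right).length = i := by
          rw [List.length_take]; omega
        have hright' : PySem.List.slice right none (some (i : Int)) ++ [("" : String)]
            ++ PySem.List.slice right (some (i : Int)) none
            = List.take i right ++ ("" :: (r :: rt)) := by
          rw [PySem.List.slice_to_natCast, PySem.List.slice_from_natCast, hdr, List.append_assoc]
          rfl
        have hget' : PySem.List.pyGet? (List.take i right ++ ("" :: (r :: rt))) (i : Int)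
            = some "" := by
          have h := PySem.List.pyGet?_append_length (List.take i right) (r :: rt) ""
          rw [htk] at h; exact h
        simp only [joinLoopA, hheadL, hheadR, if_pos hov, hright', hget']
        rw [if_neg (by push_cast [List.length_cons, List.length_nil]; omega)]
        have hrec := ih lt (m + 1) (r :: rt) (left ++ [""]) (List.take i right ++ ("" :: (r :: rt)))
          (lines ++ [l ++ " " ++ pyRjust "" (width - PySem.Str.len l - 1)]) (i + 1)
          (by
            have hc : List.countP (fun s => decide (s ≠ "")) (l :: lt)
                = List.countP (fun s => decide (s ≠ "")) lt + 1 := by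
              rw [List.countP_cons]; simp [hlne]
            simp only [List.length_cons] at hfuel ⊢
            rw [hc] at hfuel
            omega)
          (by
            rw [List.drop_append_of_le_length (by simp only [List.length_cons] at hll; omega),
              ← List.drop_drop, hdl]
            simp [List.replicate_succ', List.append_assoc])
          (by
            have hsplit : List.take i right ++ ("" :: (r :: rt))
                = (List.take i right ++ [""]) ++ (r :: rt) := by simp
            rw [hsplit]
            exact List.drop_left' (by simp [List.length_append, htk]))
          (by simp at hll ⊢; omega)
          (by simp [htk] at hrl ⊢; omega)
          (by simp at heq ⊢; omega)
          (by simp)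
          hfit
        have hcast : ((i : Int) + 1) = ((i + 1 : Nat) : Int) := by push_cast; ring
        have hcnt : (i : Int) + ((r :: rt).length : Int) + 1
            = ((i + 1 : Nat) : Int) + (((r :: rt) : List String).length : Int) := by
          push_cast; ring
        rw [hcast, hcnt, hrec]
        simp only [bfun, List.headD_cons, if_pos hov]
        simp [List.append_assoc]
      · -- no overflow: the right entry is consumed
        simp only [joinLoopA, hheadL, hheadR, if_neg hov]
        cases rt with
        | nil =>
          have hlt : lt = [] := by
            have : lt.length = 0 := by simp at heq; omega
            exact List.length_eq_zero_iff.mp this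
          subst hlt
          rw [if_pos (by push_cast [List.length_cons, List.length_nil]; omega)]
          simp only [bfun, List.headD_cons, if_neg hov]
          rfl
        | cons r2 rt2 =>
          rw [if_neg (by push_cast [List.length_cons, List.length_nil]; omega)]
          have hrec := ih lt m (r2 :: rt2) left right
            (lines ++ [l ++ " " ++ pyRjust r (width - PySem.Str.len l - 1)]) (i + 1)
            (by
              have hmono : List.countP (fun s => decide (s ≠ "")) lt
                  ≤ List.countP (fun s => decide (s ≠ "")) (l :: lt) := by
                rw [List.countP_cons]; split <;> omega
              simp only [List.length_cons] at hfuel ⊢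
              omega)
            (by rw [← List.drop_drop, hdl]; rfl)
            (by rw [← List.drop_drop, hdr]; rfl)
            (by simp at hll ⊢; omega)
            (by simp at hrl ⊢; omega)
            (by simp at heq ⊢; omega)
            (by simp)
            (fun x hx => hfit x (by simp at hx ⊢; tauto))
          have hcast : ((i : Int) + 1) = ((i + 1 : Nat) : Int) := by push_cast; ring
          have hcnt : (i : Int) + ((r :: r2 :: rt2).length : Int)
              = ((i + 1 : Nat) : Int) + (((r2 :: rt2) : List String).length : Int) := by
            push_cast; simp; ring
          rw [hcast, hcnt, hrec]
          simp only [bfun, List.headD_cons, if_neg hov, List.drop_succ_cons, List.drop_zero]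
          simp [List.append_assoc]

lemma join_justified_eq_bfun_both (left right : List String) (width : Int)
    (hpre : Pre_join_justified left right width) :
    join_justified left right width
      = bfun width (left ++ List.replicate (max left.length right.length - left.length) "")
          (right ++ List.replicate (max left.length right.length - right.length) "")
    ∧ join_justified_alt left right width
      = bfun width (left ++ List.replicate (max left.length right.length - left.length) "")
          (right ++ List.replicate (max left.length right.length - right.length) "") := by
  rcases hpre with ⟨hne, hw, hfit⟩
  have hmax : max ((left.length : Int)) ((right.length : Int))
      = ((max left.length right.length : Nat) : Int) := by
    rw [Nat.cast_max]
  have htnL : ((max left.length right.length : Nat) : Int) - (left.length : Int)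
      = ((max left.length right.length - left.length : Nat) : Int) := by
    push_cast; omega
  have htnR : ((max left.length right.length : Nat) : Int) - (right.length : Int)
      = ((max left.length right.length - right.length : Nat) : Int) := by
    push_cast; omega
  set N : Nat := max left.length right.length with hN
  set left1 := left ++ List.replicate (N - left.length) "" with hL1
  set right1 := right ++ List.replicate (N - right.length) "" with hR1
  have hlen1 : left1.length = N := by simp [hL1]; omega
  have hlen2 : right1.length = N := by simp [hR1]; omega
  have hNpos : 1 ≤ N := by
    rcases hne with h | h
    · have := List.length_pos_iff.mpr h; omega
    · have := List.length_pos_iff.mpr h; omega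
  have hfit1 : ∀ r ∈ right1, PySem.Str.len r + 1 ≤ width := by
    intro r hr
    rcases List.mem_append.mp hr with h | h
    · exact hfit r h
    · have : r = "" := List.eq_of_mem_replicate h
      subst this
      have : PySem.Str.len "" = 0 := by decide
      omega
  constructor
  · unfold join_justified
    simp only [hmax, htnL, htnR, Int.toNat_natCast, ← hN, ← hL1, ← hR1]
    have := joinLoopA_eq width (3 * (left.length + right.length) + 3) left1 0 right1
      left1 right1 [] 0
      (by
        have h1 : List.countP (fun s => decide (s ≠ "")) left1 ≤ left1.length :=
          List.countP_le_length
        omega)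
      (by simp)
      (by simp)
      (by omega)
      (by omega)
      (by omega)
      (by intro h; rw [h] at hlen2; simp at hlen2; omega)
      hfit1
    simp only [Nat.cast_zero, zero_add, hlen2] at this
    rw [this]
    rfl
  · unfold join_justified_alt
    simp only [hmax, htnL, htnR, Int.toNat_natCast, ← hN, ← hL1, ← hR1]
    exact foldl_altStep width left1 [] right1

-- ===== VERDICT (by name: the statement is the Claim_ definition above) =====
theorem join_justified_spec : Claim_equal_join_justified := by
  intro left right width _ hpre
  unfold Spec_join_justified
  have h := join_justified_eq_bfun_both left right width hpre
  rw [h.1, h.2]
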